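-- pv_equiv track=rewrite | github.com/intranautic/dump | ssqrt.py | ssqrt
-- ===== SOURCE A (Python) =====
-- def ssqrt(n: int, s: int):
--   for i in range(2, n):
--     d, m = divmod(n, i**s)
--     if not m:
--       p, q = ssqrt(d, s)
--       return (p*i, q)
--     if not d:
--       break
--   return (1, n)
-- ===== SOURCE B (Python) =====
-- def ssqrt(n, s):
--     p = 1
--     while True:
--         found = False
--         for i in range(2, n):
--             d, m = divmod(n, i**s)
--             if not m:
--                 p *= i
--                 n = d
--                 found = True
--                 break
--             if not d:
--                 break
--         if not found:
--             return (p, n)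
-- ===== Notes on version B (the rewrite author's own statement) =====
-- stated objective: alternative
-- what changed: Replaces A's self-recursion (each found divisor i triggers a recursive call whose result is rescaled by i) with a single iterative outer loop that maintains the accumulated factor p and the shrinking n directly.
import Mathlib
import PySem

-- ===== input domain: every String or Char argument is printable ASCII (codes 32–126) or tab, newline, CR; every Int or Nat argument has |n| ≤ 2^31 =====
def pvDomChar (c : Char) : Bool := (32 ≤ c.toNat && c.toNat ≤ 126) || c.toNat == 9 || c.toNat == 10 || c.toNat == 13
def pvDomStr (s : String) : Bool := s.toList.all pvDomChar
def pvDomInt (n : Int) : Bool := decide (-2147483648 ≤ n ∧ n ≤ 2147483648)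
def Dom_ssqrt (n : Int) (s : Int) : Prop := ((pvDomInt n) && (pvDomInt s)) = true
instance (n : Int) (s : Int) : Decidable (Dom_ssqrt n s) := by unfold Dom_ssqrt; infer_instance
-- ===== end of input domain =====

-- B replaces A's self-recursion with an iterative outer loop carrying an accumulator p;
-- return values proved equal on Pre_ (s ≥ 1, or n < 3 where the loop body never runs).


-- ===== PORT A =====
-- A's `for i in range(2, n)` with the recursive call on `if not m`; the dite on
-- `d.toNat < n.toNat` is a totality guard only (always true when the Python recursion
-- fires under Pre_: m = 0 and i**s ≥ 2 force d < n), never taken on admitted inputs.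
def ssqrtAuxA (s : Int) (n : Int) (i : Int) : Int × Int :=
  if hi : i < n then
    let b := i ^ s.toNat                       -- i**s (s ≥ 1 under Pre_)
    let d := PySem.Int.floordiv n b
    let m := PySem.Int.mod n b
    if m = 0 then
      let pq := if _h : d.toNat < n.toNat then ssqrtAuxA s d 2 else (1, d)
      (pq.1 * i, pq.2)
    else if d = 0 then (1, n)                  -- `if not d: break`
    else ssqrtAuxA s n (i + 1)
  else (1, n)
termination_by (n.toNat, (n - i).toNat)
decreasing_by
  · exact Prod.Lex.left _ _ _h
  · exact Prod.Lex.right _ (by omega)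

def ssqrt (n : Int) (s : Int) : Int × Int := ssqrtAuxA s n 2

-- ===== PORT B =====
-- B's inner `for` scan: some (i, d) means a divisor was found (p *= i; n = d), none = no divisor.
def ssqrtScan (s : Int) (n : Int) (i : Int) : Option (Int × Int) :=
  if hi : i < n then
    let b := i ^ s.toNat
    let d := PySem.Int.floordiv n b
    let m := PySem.Int.mod n b
    if m = 0 then some (i, d)
    else if d = 0 then none
    else ssqrtScan s n (i + 1)
  else none
termination_by (n - i).toNat
decreasing_by omega

-- B's `while True` outer loop; the dite is the same totality guard, never taken under Pre_.
def ssqrtOuter (s : Int) (p : Int) (n : Int) : Int × Int :=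
  match ssqrtScan s n 2 with
  | some (i, d) => if h : d.toNat < n.toNat then ssqrtOuter s (p * i) d else (p * i, d)
  | none => (p, n)
termination_by n.toNat
decreasing_by exact h

def ssqrt_alt (n : Int) (s : Int) : Int × Int := ssqrtOuter s 1 n

-- ===== PRECONDITION & SPEC =====
-- Pre_ excludes exactly the inputs on which the Python A does not return a value of the
-- declared type: for n ≥ 3 and s = 0 A recurses forever (divmod(n,1) = (n,0)), and for
-- n ≥ 3 and s < 0 it raises TypeError (i**s is a float, then range(2, float)).
def Pre_ssqrt (n : Int) (s : Int) : Prop := 1 ≤ s ∨ n < 3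
instance (n : Int) (s : Int) : Decidable (Pre_ssqrt n s) := by unfold Pre_ssqrt; infer_instance
def pvWitness_ssqrt : Int × Int := (72, 2)

def Spec_ssqrt (n : Int) (s : Int) (out : Int × Int) : Prop := out = ssqrt_alt n s
instance (n : Int) (s : Int) (out : Int × Int) : Decidable (Spec_ssqrt n s out) := by unfold Spec_ssqrt; infer_instance

-- ===== CLAIM (what is proved, stated in full; the proofs are below) =====
def Claim_equal_ssqrt : Prop := ∀ (n : Int) (s : Int), Dom_ssqrt n s → Pre_ssqrt n s → Spec_ssqrt n s (ssqrt n s)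

-- ===== LEMMAS AND PROOFS =====

-- A's loop from position i, characterised by B's scan of the same range.
theorem ssqrtAuxA_eq_scan (s n i : Int) :
    ssqrtAuxA s n i =
      match ssqrtScan s n i with
      | some (j, d) =>
          let pq := if _ : d.toNat < n.toNat then ssqrtAuxA s d 2 else (1, d)
          (pq.1 * j, pq.2)
      | none => (1, n) := by
  fun_induction ssqrtScan s n i with
  | case1 i hlt b d m hm =>
      rw [ssqrtAuxA]
      rw [dif_pos hlt, if_pos (show PySem.Int.mod n (i ^ s.toNat) = 0 from hm)]
  | case2 i hlt b d m hm hd =>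
      rw [ssqrtAuxA]
      rw [dif_pos hlt, if_neg (show ¬ PySem.Int.mod n (i ^ s.toNat) = 0 from hm),
          if_pos (show PySem.Int.floordiv n (i ^ s.toNat) = 0 from hd)]
  | case3 i hlt b d m hm hd ih =>
      rw [ssqrtAuxA]
      rw [dif_pos hlt, if_neg (show ¬ PySem.Int.mod n (i ^ s.toNat) = 0 from hm),
          if_neg (show ¬ PySem.Int.floordiv n (i ^ s.toNat) = 0 from hd)]
      exact ih
  | case4 i hlt =>
      rw [ssqrtAuxA]
      rw [dif_neg hlt]

-- The accumulator invariant: scaling A's first component by p gives B's outer loop.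
theorem ssqrtOuter_eq (s p n : Int) :
    ssqrtOuter s p n = (p * (ssqrtAuxA s n 2).1, (ssqrtAuxA s n 2).2) := by
  fun_induction ssqrtOuter s p n with
  | case1 p n i d hscan h ih =>
      rw [ssqrtAuxA_eq_scan s n 2, hscan]
      simp only [dif_pos h] at ih ⊢
      rw [ih]
      exact Prod.ext (by ring) rfl
  | case2 p n i d hscan h =>
      rw [ssqrtAuxA_eq_scan s n 2, hscan]
      simp only [dif_neg h]
      exact Prod.ext (by ring) rfl
  | case3 p n hscan =>
      rw [ssqrtAuxA_eq_scan s n 2, hscan]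
      simp only [mul_one]

-- ===== VERDICT (by name: the statement is the Claim_ definition above) =====
theorem ssqrt_spec : Claim_equal_ssqrt := by
  intro n s _ _
  unfold Spec_ssqrt ssqrt ssqrt_alt
  rw [ssqrtOuter_eq]
  simp
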